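-- pv_equiv track=rewrite | github.com/maybe-william/Markdown2HTML | parser.py | parseParagraphs
-- ===== SOURCE A (Python) =====
-- def parseParagraphs(input):
--     """This function parses paragraphs for md"""
--     input.append("")
--     newIn = []
--     para = False
--     for i in input:
--         if len(i) > 0 and i[0] not in ['*', '-', '#', '\n']:
--             if para:
--                 newIn.append('<br />')
--                 newIn.append(i)
--             else:
--                 para = True
--                 newIn.append('<p>')
--                 newIn.append(i)
--         elif (len(i) == 0 or i[0] == '\n') and para:
--             para = False
--             newIn.append("</p>")
--         else:
--             newIn.append(i)
--     newIn[-1] = newIn[-1].rstrip('\n')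
--     return newIn
-- ===== SOURCE B (Python) =====
-- def _renderSegment(seg):
--     """Render one separator-free segment; returns (rendered lines, had a paragraph)."""
--     out = []
--     para = False
--     for line in seg:
--         if line[:1] not in ('*', '-', '#'):
--             out.append('<br />' if para else '<p>')
--             out.append(line)
--             para = True
--         else:
--             out.append(line)
--     return out, para
--
--
-- def parseParagraphs(input):
--     """This function parses paragraphs for md"""
--     input.append("")
--     out = []
--     seg = []
--     for line in input:
--         if len(line) == 0 or line[0] == '\n':
--             rendered, para = _renderSegment(seg)
--             out.extend(rendered)
--             out.append('</p>' if para else line)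
--             seg = []
--         else:
--             seg.append(line)
--     out.extend(_renderSegment(seg)[0])
--     out[-1] = out[-1].rstrip('\n')
--     return out
-- ===== Notes on version B (the rewrite author's own statement) =====
-- stated objective: alternative
-- what changed: Replaces A's single cross-line state machine (a para flag threaded through every line kind) by a two-level decomposition: split the lines into separator-delimited segments and render each segment independently with a local helper, emitting the closing tag per segment.
import Mathlib
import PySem

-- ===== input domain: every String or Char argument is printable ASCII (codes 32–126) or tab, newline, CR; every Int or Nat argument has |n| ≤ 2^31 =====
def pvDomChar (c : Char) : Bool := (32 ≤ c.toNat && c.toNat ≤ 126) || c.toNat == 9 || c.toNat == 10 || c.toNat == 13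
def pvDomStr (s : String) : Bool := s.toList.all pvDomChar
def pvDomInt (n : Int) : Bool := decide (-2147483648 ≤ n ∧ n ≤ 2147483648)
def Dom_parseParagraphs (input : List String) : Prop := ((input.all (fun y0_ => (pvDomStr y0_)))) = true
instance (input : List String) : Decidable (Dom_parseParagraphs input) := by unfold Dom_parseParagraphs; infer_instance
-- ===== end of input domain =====

-- B re-decomposes A's cross-line state machine into separator-delimited segments rendered by a local helper (alternative decomposition, same cost); both mutate `input` by appending "" (equivalence proved for the RETURN value; Source B performs the same mutation).


-- ===== PORT A =====
-- s.rstrip('\n'): drop every trailing '\n' (exact hand port of str.rstrip with a single char)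
def rstripNl (s : String) : String := String.mk ((s.toList.reverse.dropWhile (· == '\n')).reverse)

-- newIn[-1] = rstripNl newIn[-1]; on [] Python would raise, but newIn is never empty
def setLastRstrip : List String → List String
  | [] => []
  | [x] => [rstripNl x]
  | x :: y :: xs => x :: setLastRstrip (y :: xs)

-- len(i) > 0 and i[0] not in ['*', '-', '#', '\n']
def paraLineA (s : String) : Bool :=
  match s.toList with
  | [] => false
  | c :: _ => !(c == '*' || c == '-' || c == '#' || c == '\n')

-- len(i) == 0 or i[0] == '\n'
def sepA (s : String) : Bool :=
  match s.toList with
  | [] => true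
  | c :: _ => c == '\n'

-- one iteration of A's loop over (newIn, para)
def stepA (st : List String × Bool) (i : String) : List String × Bool :=
  if paraLineA i then
    if st.2 then (st.1 ++ ["<br />", i], st.2)
    else (st.1 ++ ["<p>", i], true)
  else if sepA i && st.2 then (st.1 ++ ["</p>"], false)
  else (st.1 ++ [i], st.2)

def parseParagraphs (input : List String) : List String :=
  setLastRstrip ((input ++ [""]).foldl stepA ([], false)).1

-- ===== PORT B =====
-- line[:1] not in ('*', '-', '#')
def paraLineB (s : String) : Bool :=
  !(s.toList.take 1 == ['*'] || s.toList.take 1 == ['-'] || s.toList.take 1 == ['#'])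

-- len(line) == 0 or line[0] == '\n'
def sepB (s : String) : Bool :=
  match s.toList with
  | [] => true
  | c :: _ => c == '\n'

-- one iteration of _renderSegment's loop
def renderStep (st : List String × Bool) (line : String) : List String × Bool :=
  if paraLineB line then (st.1 ++ [if st.2 then "<br />" else "<p>", line], true)
  else (st.1 ++ [line], st.2)

-- _renderSegment(seg)
def renderSegment (seg : List String) : List String × Bool :=
  seg.foldl renderStep ([], false)

-- one iteration of parseParagraphs' (B) loop over (out, seg)
def stepB (st : List String × List String) (line : String) : List String × List String :=
  if sepB line then
    let r := renderSegment st.2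
    (st.1 ++ r.1 ++ [if r.2 then "</p>" else line], [])
  else (st.1, st.2 ++ [line])

def parseParagraphs_alt (input : List String) : List String :=
  let st := (input ++ [""]).foldl stepB ([], [])
  setLastRstrip (st.1 ++ (renderSegment st.2).1)

-- ===== PRECONDITION & SPEC =====
def Spec_parseParagraphs (input : List String) (out : List String) : Prop := out = parseParagraphs_alt input
instance (input : List String) (out : List String) : Decidable (Spec_parseParagraphs input out) := by unfold Spec_parseParagraphs; infer_instance

-- ===== CLAIM (what is proved, stated in full; the proofs are below) =====
def Claim_equal_parseParagraphs : Prop := ∀ (input : List String), Dom_parseParagraphs input → Spec_parseParagraphs input (parseParagraphs input)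

-- ===== LEMMAS AND PROOFS =====

-- on a non-separator line the two paragraph tests agree
lemma paraLine_agree (s : String) (h : sepA s = false) : paraLineA s = paraLineB s := by
  unfold paraLineA paraLineB sepA at *
  cases hs : s.toList with
  | nil => simp [hs] at h
  | cons c cs =>
    simp [hs] at h ⊢
    rcases Decidable.em (c = '*') with h1 | h1 <;>
      rcases Decidable.em (c = '-') with h2 | h2 <;>
        rcases Decidable.em (c = '#') with h3 | h3 <;>
          simp [h1, h2, h3, h]

lemma renderSegment_snoc (seg : List String) (l : String) :
    renderSegment (seg ++ [l]) = renderStep (renderSegment seg) l := by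
  unfold renderSegment; rw [List.foldl_append]; rfl

-- loop invariant: A's state is B's out ++ the rendering of B's pending segment
lemma fold_agree (l : List String) (out seg : List String) :
    l.foldl stepA (out ++ (renderSegment seg).1, (renderSegment seg).2)
      = ((l.foldl stepB (out, seg)).1 ++ (renderSegment (l.foldl stepB (out, seg)).2).1,
         (renderSegment (l.foldl stepB (out, seg)).2).2) := by
  induction l generalizing out seg with
  | nil => simp
  | cons i t ih =>
    simp only [List.foldl_cons]
    by_cases hsep : sepA i = true
    · have hsB : sepB i = true := by
        unfold sepA at hsep; unfold sepB; exact hsep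
      have h1 : stepA (out ++ (renderSegment seg).1, (renderSegment seg).2) i
          = (out ++ (renderSegment seg).1 ++ [if (renderSegment seg).2 then "</p>" else i], false) := by
        have hpA : paraLineA i = false := by
          unfold paraLineA sepA at *
          cases hs : i.toList with
          | nil => simp
          | cons c cs => simp [hs] at hsep ⊢; simp [hsep]
        unfold stepA
        by_cases hp : (renderSegment seg).2 <;> simp [hpA, hsep, hp]
      have h2 : stepB (out, seg) i
          = (out ++ (renderSegment seg).1 ++ [if (renderSegment seg).2 then "</p>" else i], []) := by
        unfold stepB; simp [hsB]
      rw [h1, h2]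
      have := ih (out ++ (renderSegment seg).1 ++ [if (renderSegment seg).2 then "</p>" else i]) []
      simpa [renderSegment] using this
    · have hsep' : sepA i = false := by simpa using hsep
      have hsB : sepB i = false := by
        unfold sepA at hsep'; unfold sepB; exact hsep'
      have h2 : stepB (out, seg) i = (out, seg ++ [i]) := by
        unfold stepB; simp [hsB]
      have h1 : stepA (out ++ (renderSegment seg).1, (renderSegment seg).2) i
          = (out ++ (renderSegment (seg ++ [i])).1, (renderSegment (seg ++ [i])).2) := by
        rw [renderSegment_snoc]
        unfold stepA renderStep
        rw [paraLine_agree i hsep']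
        by_cases hp : paraLineB i = true
        · by_cases hq : (renderSegment seg).2 <;> simp [hp, hq]
        · have hp' : paraLineB i = false := by simpa using hp
          simp [hp', hsep']
      rw [h1, h2]
      exact ih out (seg ++ [i])

-- ===== VERDICT (by name: the statement is the Claim_ definition above) =====
theorem parseParagraphs_spec : Claim_equal_parseParagraphs := by
  intro input _
  unfold Spec_parseParagraphs parseParagraphs parseParagraphs_alt
  have h := fold_agree (input ++ [""]) [] []
  simp only [renderSegment, List.foldl_nil, List.nil_append] at h
  rw [h]; simp [renderSegment]
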